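-- pv_equiv track=rewrite | github.com/vpauwels/CAAM_Public | GAME_database/A0Q0/marking.py | mark_s
-- ===== SOURCE A (Python) =====
-- def mark_s(var_str,cor,res,mark,mark_p):
--
--     if (cor == res):
--         f='The '+var_str+' is correct.\n'
--         mark_p=mark_p+mark
--     if (cor != res):
--         cor_out=''
--         L=len(cor)
--         for i in range(0,L):
--             if ( (cor[i] != '<') and (cor[i] != '>') ):
--                 cor_out=cor_out+cor[i]
--             if ( (cor[i] == '<') or (cor[i] == '>') ):
--                 cor_out=cor_out+'$'
--                 cor_out=cor_out+cor[i]
--                 cor_out=cor_out+'$'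
--         f='The correct '+var_str+' is '+cor_out+'.'
--
--     return(f,mark_p)
-- ===== SOURCE B (Python) =====
-- def mark_s(var_str, cor, res, mark, mark_p):
--     if cor == res:
--         return ('The ' + var_str + ' is correct.\n', mark_p + mark)
--     cor_out = '$>$'.join('$<$'.join(cor.split('<')).split('>'))
--     return ('The correct ' + var_str + ' is ' + cor_out + '.', mark_p)
-- ===== Notes on version B (the rewrite author's own statement) =====
-- stated objective: faster
-- what changed: A's per-character scan-and-concatenate escape loop is replaced by a two-stage split/join algorithm: cor is split into segments at '<' and rejoined with '$<$', then split at '>' and rejoined with '$>$'; no per-character Python-level branching or concatenation remains.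
import Mathlib
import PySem

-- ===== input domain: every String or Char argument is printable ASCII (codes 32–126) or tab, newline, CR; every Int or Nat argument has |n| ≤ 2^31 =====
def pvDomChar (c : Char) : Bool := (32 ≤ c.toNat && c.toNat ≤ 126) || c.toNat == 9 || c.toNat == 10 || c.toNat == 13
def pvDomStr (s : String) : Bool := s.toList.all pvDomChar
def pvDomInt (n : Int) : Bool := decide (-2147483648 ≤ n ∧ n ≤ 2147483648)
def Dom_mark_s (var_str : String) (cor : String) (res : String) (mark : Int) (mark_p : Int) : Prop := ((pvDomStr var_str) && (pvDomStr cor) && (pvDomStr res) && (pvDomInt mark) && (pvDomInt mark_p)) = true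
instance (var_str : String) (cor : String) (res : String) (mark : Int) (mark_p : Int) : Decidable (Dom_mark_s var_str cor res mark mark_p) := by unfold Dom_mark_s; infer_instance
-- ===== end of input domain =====

-- ===== PORT A =====
-- B replaces A's per-character scan-and-concatenate escape loop with a two-stage split/join
-- pipeline (measured faster in a timing run; same return value).
-- literal port of A: per-character loop over cor building cor_out by string concatenation
def mark_s (var_str : String) (cor : String) (res : String) (mark : Int) (mark_p : Int) : String × Int :=
  if cor == res then
    ("The " ++ var_str ++ " is correct.\n", mark_p + mark)
  else
    let cor_out := cor.toList.foldl (fun acc c =>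
      let acc := if c != '<' && c != '>' then acc ++ String.singleton c else acc
      let acc := if c == '<' || c == '>' then acc ++ "$" ++ String.singleton c ++ "$" else acc
      acc) ""
    ("The correct " ++ var_str ++ " is " ++ cor_out ++ ".", mark_p)

-- ===== PORT B =====
-- port of B: cor_out = '$>$'.join('$<$'.join(cor.split('<')).split('>')), via PySem.Chars
def mark_s_alt (var_str : String) (cor : String) (res : String) (mark : Int) (mark_p : Int) : String × Int :=
  if cor == res then
    ("The " ++ var_str ++ " is correct.\n", mark_p + mark)
  else
    let cor_out := String.ofList
      (PySem.Chars.join "$>$".toList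
        (PySem.Chars.splitOn
          (PySem.Chars.join "$<$".toList (PySem.Chars.splitOn cor.toList "<".toList))
          ">".toList))
    ("The correct " ++ var_str ++ " is " ++ cor_out ++ ".", mark_p)

-- ===== PRECONDITION & SPEC =====
def Spec_mark_s (var_str : String) (cor : String) (res : String) (mark : Int) (mark_p : Int) (out : String × Int) : Prop := out = mark_s_alt var_str cor res mark mark_p
instance (var_str : String) (cor : String) (res : String) (mark : Int) (mark_p : Int) (out : String × Int) : Decidable (Spec_mark_s var_str cor res mark mark_p out) := by unfold Spec_mark_s; infer_instance

-- ===== CLAIM (what is proved, stated in full; the proofs are below) =====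
def Claim_equal_mark_s : Prop := ∀ (var_str : String) (cor : String) (res : String) (mark : Int) (mark_p : Int), Dom_mark_s var_str cor res mark mark_p → Spec_mark_s var_str cor res mark mark_p (mark_s var_str cor res mark mark_p)

-- ===== LEMMAS AND PROOFS =====

-- substitute a single char a by sep
def pvRepl (a : Char) (sep : List Char) (c : Char) : List Char := if c == a then sep else [c]

-- the per-character escape map both sides compute
def pvEsc (c : Char) : List Char := if c == '<' || c == '>' then ['$', c, '$'] else [c]

-- prepend onto the first piece
def pvConsHead (x : List Char) : List (List Char) → List (List Char)
  | [] => [x]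
  | p :: ps => (x ++ p) :: ps

-- the pieces of l split at char a (always nonempty)
def pvPieces (a : Char) : List Char → List (List Char)
  | [] => [[]]
  | c :: r => if c == a then [] :: pvPieces a r else pvConsHead [c] (pvPieces a r)

theorem pvPieces_ne_nil (a : Char) (l : List Char) : pvPieces a l ≠ [] := by
  cases l with
  | nil => simp [pvPieces]
  | cons c r =>
    simp only [pvPieces]
    split
    · simp
    · cases h : pvPieces a r <;> simp [pvConsHead]

theorem pvConsHead_consHead (x y : List Char) (p : List (List Char)) :
    pvConsHead x (pvConsHead y p) = pvConsHead (x ++ y) p := by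
  cases p <;> simp [pvConsHead]

theorem pv_go_eq (a : Char) : ∀ (fuel : Nat) (l : List Char), l.length < fuel →
    ∀ (cur : List Char) (acc : List (List Char)),
    PySem.Chars.splitOn.go [a] fuel l cur acc = acc.reverse ++ pvConsHead cur.reverse (pvPieces a l) := by
  intro fuel
  induction fuel with
  | zero => intro l h; omega
  | succ f ih =>
    intro l h cur acc
    cases l with
    | nil => simp [PySem.Chars.splitOn.go, pvPieces, pvConsHead]
    | cons c rest =>
      have hpre : List.isPrefixOf [a] (c :: rest) = (a == c) := by
        simp [List.isPrefixOf]
      by_cases hc : c = a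
      · have : List.isPrefixOf [a] (c :: rest) = true := by simp [hc]
        simp only [PySem.Chars.splitOn.go, this, if_true, List.length_cons,
          List.length_nil, Nat.zero_add, List.drop_succ_cons, List.drop_zero]
        rw [ih rest (by simpa using Nat.lt_of_succ_lt_succ h) [] (cur.reverse :: acc)]
        simp [pvPieces, hc, pvConsHead]
        cases hp : pvPieces a rest with
        | nil => exact absurd hp (pvPieces_ne_nil a rest)
        | cons p ps => simp
      · have : List.isPrefixOf [a] (c :: rest) = false := by
          rw [hpre]; exact beq_eq_false_iff_ne.mpr (Ne.symm hc)
        simp only [PySem.Chars.splitOn.go, this, Bool.false_eq_true, if_false]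
        rw [ih rest (by simpa using Nat.lt_of_succ_lt_succ h) (c :: cur) acc]
        have hca : (c == a) = false := beq_eq_false_iff_ne.mpr hc
        simp [pvPieces, hca, pvConsHead_consHead]

theorem pv_splitOn_single (a : Char) (l : List Char) :
    PySem.Chars.splitOn l [a] = pvPieces a l := by
  unfold PySem.Chars.splitOn
  rw [pv_go_eq a (l.length + 1) l (by omega) [] []]
  cases hp : pvPieces a l with
  | nil => exact absurd hp (pvPieces_ne_nil a l)
  | cons p ps => simp [pvConsHead]

theorem pv_intercalate_cons_cons (sep a b : List Char) (l : List (List Char)) :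
    sep.intercalate (a :: b :: l) = a ++ sep ++ sep.intercalate (b :: l) := by
  simp [List.intercalate, List.intersperse]

theorem pv_intercalate_consHead (sep x p : List Char) (ps : List (List Char)) :
    sep.intercalate (pvConsHead x (p :: ps)) = x ++ sep.intercalate (p :: ps) := by
  cases ps with
  | nil => simp [pvConsHead, List.intercalate]
  | cons q qs => simp [pvConsHead, pv_intercalate_cons_cons]

theorem pv_intercalate_pieces (a : Char) (sep : List Char) (l : List Char) :
    sep.intercalate (pvPieces a l) = l.flatMap (pvRepl a sep) := by
  induction l with
  | nil => simp [pvPieces, List.intercalate]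
  | cons c r ih =>
    by_cases hc : c = a
    · have h1 : (c == a) = true := by simp [hc]
      cases hp : pvPieces a r with
      | nil => exact absurd hp (pvPieces_ne_nil a r)
      | cons p ps =>
        simp only [pvPieces, h1, if_true, List.flatMap_cons, pvRepl, hp,
          pv_intercalate_cons_cons, hp ▸ ih]
        simp
    · have h1 : (c == a) = false := by simp [hc]
      cases hp : pvPieces a r with
      | nil => exact absurd hp (pvPieces_ne_nil a r)
      | cons p ps =>
        simp only [pvPieces, h1, Bool.false_eq_true, if_false, hp, pv_intercalate_consHead,
          List.flatMap_cons, pvRepl, hp ▸ ih]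

-- one split/join stage = one flatMap substitution
theorem pv_stage (a : Char) (sep : List Char) (l : List Char) :
    PySem.Chars.join sep (PySem.Chars.splitOn l [a]) = l.flatMap (pvRepl a sep) := by
  rw [PySem.Chars.join, pv_splitOn_single, pv_intercalate_pieces]

-- the two stages compose to the per-character escape map
theorem pv_stages_eq_esc (l : List Char) :
    (l.flatMap (pvRepl '<' ['$', '<', '$'])).flatMap (pvRepl '>' ['$', '>', '$']) =
      l.flatMap pvEsc := by
  induction l with
  | nil => simp
  | cons c r ih =>
    simp only [List.flatMap_cons, List.flatMap_append, ih]
    congr 1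
    by_cases h1 : c = '<'
    · simp [pvRepl, pvEsc, h1]
    · by_cases h2 : c = '>'
      · simp [pvRepl, pvEsc, h2]
      · simp [pvRepl, pvEsc, h1, h2]

-- A's accumulation loop computes the flatMap of the escape map
theorem mark_s_fold_eq (l : List Char) (acc : String) :
    l.foldl (fun acc c =>
      let acc := if c != '<' && c != '>' then acc ++ String.singleton c else acc
      let acc := if c == '<' || c == '>' then acc ++ "$" ++ String.singleton c ++ "$" else acc
      acc) acc = acc ++ String.ofList (l.flatMap pvEsc) := by
  induction l generalizing acc with
  | nil => simp
  | cons c t ih =>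
    simp only [List.foldl_cons, List.flatMap_cons, ih, pvEsc]
    apply String.toList_inj.mp
    by_cases h : c = '<' ∨ c = '>'
    · have hb : (c == '<' || c == '>') = true := by
        rcases h with h | h <;> simp [h]
      have hb' : (c != '<' && c != '>') = false := by
        rcases h with h | h <;> simp [h]
      rw [hb', hb]
      simp [String.toList_append, String.toList_ofList, String.singleton, String.toList_push]
    · have h1 : c ≠ '<' := fun hc => h (Or.inl hc)
      have h2 : c ≠ '>' := fun hc => h (Or.inr hc)
      simp [h1, h2, String.toList_append, String.toList_ofList, String.singleton,
        String.toList_push]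

-- ===== VERDICT (by name: the statement is the Claim_ definition above) =====
theorem mark_s_spec : Claim_equal_mark_s := by
  intro var_str cor res mark mark_p _
  unfold Spec_mark_s mark_s mark_s_alt
  by_cases h : cor == res
  · simp [h]
  · simp only [h, if_false, Bool.false_eq_true]
    rw [mark_s_fold_eq]
    have h1 : "<".toList = ['<'] := by decide
    have h2 : ">".toList = ['>'] := by decide
    have h3 : "$<$".toList = ['$', '<', '$'] := by decide
    have h4 : "$>$".toList = ['$', '>', '$'] := by decide
    rw [h1, h2, h3, h4, pv_stage, pv_stage, pv_stages_eq_esc]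
    simp
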